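-- pv_equiv track=rewrite | github.com/kimsh8337/daliy-coding | 연습/20.09/문제/11.py | solution
-- ===== SOURCE A (Python) =====
-- def solution(S):
--     answer = 0
--     flag = 2
--     for i in range(len(S)):
--         if S[i] == 'a':
--             flag -= 1
--             if flag < 0:
--                 return -1
--         else:
--             answer += flag
--             flag = 2
--     if S[-1] != 'a':
--         answer += 2
--
--     return answer
-- ===== SOURCE B (Python) =====
-- def solution(S):
--     answer = 0
--     a_run = 0
--     n = len(S)
--     i = 0
--     while i < n:
--         j = i
--         while j < n and S[j] == S[i]:
--             j += 1
--         L = j - i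
--         if S[i] == 'a':
--             if L >= 3:
--                 return -1
--             a_run = L
--         else:
--             answer += 2 * L - a_run
--             a_run = 0
--         i = j
--     if S[-1] != 'a':
--         answer += 2
--     return answer
-- ===== Notes on version B (the rewrite author's own statement) =====
-- stated objective: alternative
-- what changed: B iterates over maximal same-character runs (two-pointer run scan) keeping the length of the last 'a'-run, instead of A's per-character flag-counter loop; a non-'a' run of length L contributes 2*L minus the preceding a-run length.
-- outside the precondition, e.g. on solution(''): A raises IndexError, B raises IndexError
import Mathlib
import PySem

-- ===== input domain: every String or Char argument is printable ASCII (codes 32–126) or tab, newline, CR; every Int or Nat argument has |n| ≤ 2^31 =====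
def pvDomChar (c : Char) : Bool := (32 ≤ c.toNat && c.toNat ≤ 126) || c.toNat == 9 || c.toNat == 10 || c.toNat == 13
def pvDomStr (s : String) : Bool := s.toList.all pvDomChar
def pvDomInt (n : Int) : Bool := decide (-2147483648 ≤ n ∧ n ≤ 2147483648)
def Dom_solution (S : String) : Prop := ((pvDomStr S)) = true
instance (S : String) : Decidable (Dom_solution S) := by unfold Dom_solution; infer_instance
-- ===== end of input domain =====

-- B replaces A's per-character flag counter by a scan over maximal same-character runs
-- (objective: alternative decomposition, same O(n) cost).

-- ===== PORT A =====
-- per-character loop: state (answer, flag); early return -1 becomes Sum.inl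
def solA_loop : List Char → Int → Int → Sum Int (Int × Int)
  | [], ans, flag => .inr (ans, flag)
  | c :: rest, ans, flag =>
    if c == 'a' then
      if flag - 1 < 0 then .inl (-1) else solA_loop rest ans (flag - 1)
    else solA_loop rest (ans + flag) 2

def solution (S : String) : Int :=
  match solA_loop S.toList 0 2 with
  | .inl r => r
  | .inr (ans, _) =>
      -- S[-1] raises IndexError on the empty string (excluded by Pre_solution)
      if PySem.Str.pyGet? S (-1) ≠ some 'a' then ans + 2 else ans

-- ===== PORT B =====
-- run loop: take the maximal run of the leading character, then recurse on the rest
def solB_loop : List Char → Int → Int → Sum Int Int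
  | [], ans, _ => .inr ans
  | c :: rest, ans, aRun =>
    let run := (c :: rest).takeWhile (· == c)
    let L : Int := (run.length : Int)
    let rest' := (c :: rest).dropWhile (· == c)
    if c == 'a' then
      if L ≥ 3 then .inl (-1) else solB_loop rest' ans L
    else solB_loop rest' (ans + 2 * L - aRun) 0
termination_by xs => xs.length
decreasing_by
  all_goals
    simp only [List.dropWhile_cons, beq_self_eq_true, if_true]
    exact Nat.lt_succ_of_le (List.length_dropWhile_le _ _)

def solution_alt (S : String) : Int :=
  match solB_loop S.toList 0 0 with
  | .inl r => r
  | .inr ans =>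
      if PySem.Str.pyGet? S (-1) ≠ some 'a' then ans + 2 else ans

-- ===== PRECONDITION & SPEC =====
-- Pre_ excludes only the empty string, on which A's S[-1] raises IndexError.
def Pre_solution (S : String) : Prop := S ≠ ""
instance (S : String) : Decidable (Pre_solution S) := by unfold Pre_solution; infer_instance
def pvWitness_solution : String := "ab"

def Spec_solution (S : String) (out : Int) : Prop := out = solution_alt S
instance (S : String) (out : Int) : Decidable (Spec_solution S out) := by unfold Spec_solution; infer_instance

-- ===== CLAIM (what is proved, stated in full; the proofs are below) =====
def Claim_equal_solution : Prop := ∀ (S : String), Dom_solution S → Pre_solution S → Spec_solution S (solution S)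

-- ===== LEMMAS AND PROOFS =====

def pvToRes : Sum Int (Int × Int) → Sum Int Int
  | .inl r => .inl r
  | .inr (a, _) => .inr a

-- A's loop across a run of k 'a's
theorem solA_run_a (k : Nat) : ∀ (ys : List Char) (ans flag : Int), 0 ≤ flag →
    solA_loop (List.replicate k 'a' ++ ys) ans flag =
      (if flag - k < 0 then .inl (-1) else solA_loop ys ans (flag - k)) := by
  induction k with
  | zero => intro ys ans flag h0; simp [not_lt.2 h0]
  | succ k ih =>
    intro ys ans flag h0
    have hcast : (((k + 1 : Nat)) : Int) = (k : Int) + 1 := by push_cast; ring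
    simp only [List.replicate_succ, List.cons_append, solA_loop, beq_self_eq_true, if_true, hcast]
    by_cases h1 : flag - 1 < 0
    · rw [if_pos h1, if_pos (by omega)]
    · rw [if_neg h1, ih ys ans (flag - 1) (by omega)]
      by_cases h2 : flag - 1 - (k : Int) < 0
      · rw [if_pos h2, if_pos (by omega)]
      · rw [if_neg h2, if_neg (by omega)]
        congr 1
        ring

-- A's loop across a run of k chars c ≠ 'a'
theorem solA_run_b (k : Nat) (hk : 1 ≤ k) (c : Char) (hc : c ≠ 'a') :
    ∀ (ys : List Char) (ans flag : Int),
    solA_loop (List.replicate k c ++ ys) ans flag =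
      solA_loop ys (ans + flag + 2 * (k - 1)) 2 := by
  induction k with
  | zero => omega
  | succ k ih =>
    intro ys ans flag
    simp only [List.replicate_succ, List.cons_append, solA_loop]
    rw [if_neg (by simpa using hc)]
    rcases Nat.eq_zero_or_pos k with hk0 | hk1
    · subst hk0; simp
    · rw [ih hk1 ys (ans + flag) 2]
      congr 1
      push_cast [Nat.cast_sub hk1]
      ring

theorem takeWhile_eq_replicate (c : Char) (xs : List Char) :
    xs.takeWhile (· == c) = List.replicate (xs.takeWhile (· == c)).length c := by
  rw [List.eq_replicate_iff]
  refine ⟨rfl, fun b hb => ?_⟩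
  have := List.mem_takeWhile_imp hb
  simpa using this

theorem head_dropWhile_ne (p : Char → Bool) (xs : List Char) (d : Char) (rs : List Char)
    (h : xs.dropWhile p = d :: rs) : p d = false := by
  induction xs with
  | nil => simp at h
  | cons x xt ih =>
    by_cases hx : p x
    · rw [List.dropWhile_cons_of_pos hx] at h; exact ih h
    · rw [List.dropWhile_cons_of_neg hx] at h
      cases h; simpa using hx

-- main invariant: A's flag is 2 - aRun; when aRun ≠ 0 the next char is not 'a'
theorem loop_eq (xs : List Char) (ans aRun : Int)
    (h0 : 0 ≤ aRun) (h2 : aRun ≤ 2) (hh : aRun ≠ 0 → xs.head? ≠ some 'a') :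
    pvToRes (solA_loop xs ans (2 - aRun)) = solB_loop xs ans aRun := by
  match xs with
  | [] => simp [solA_loop, solB_loop, pvToRes]
  | c :: rest =>
    have hsplit : (c :: rest).takeWhile (· == c) ++ (c :: rest).dropWhile (· == c) = c :: rest :=
      List.takeWhile_append_dropWhile
    set run := (c :: rest).takeWhile (· == c) with hrun
    set rest' := (c :: rest).dropWhile (· == c) with hrest'
    have hL1 : 1 ≤ run.length := by
      rw [hrun]; simp
    have hrepl : run = List.replicate run.length c := takeWhile_eq_replicate c _
    have hlt : rest'.length < (c :: rest).length := by
      rw [hrest']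
      simp only [List.dropWhile_cons, beq_self_eq_true, if_true]
      exact Nat.lt_succ_of_le (List.length_dropWhile_le _ _)
    have hhead' : ∀ d rs, rest' = d :: rs → d ≠ c := by
      intro d rs h
      have := head_dropWhile_ne (· == c) (c :: rest) d rs (hrest' ▸ h)
      simpa using this
    by_cases hca : c = 'a'
    · have haR : aRun = 0 := by
        by_contra h
        exact hh h (by simp [hca])
      subst haR; subst hca
      have hA : solA_loop ('a' :: rest) ans (2 - 0) =
          (if (2 : Int) - 0 - run.length < 0 then .inl (-1)
           else solA_loop rest' ans (2 - 0 - run.length)) := by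
        conv_lhs => rw [← hsplit, hrepl]
        exact solA_run_a run.length rest' ans (2 - 0) (by omega)
      rw [hA, solB_loop]
      simp only [beq_self_eq_true, if_true, ← hrun, ← hrest']
      by_cases h3 : ((run.length : Int)) ≥ 3
      · rw [if_pos (by omega), if_pos h3]; rfl
      · rw [if_neg (by omega), if_neg h3]
        rw [show (2 : Int) - 0 - (run.length : Int) = 2 - (run.length : Int) from by ring]
        exact loop_eq rest' ans run.length (by omega) (by omega)
          (fun _ => by
            cases hre : rest' with
            | nil => simp
            | cons d rs =>
              simpa using (hhead' d rs hre))
    · have hA : solA_loop (c :: rest) ans (2 - aRun) =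
          solA_loop rest' (ans + (2 - aRun) + 2 * ((run.length : Int) - 1)) 2 := by
        conv_lhs => rw [← hsplit, hrepl]
        rw [solA_run_b run.length hL1 c hca rest' ans (2 - aRun)]
      rw [hA, solB_loop, if_neg (by simpa using hca)]
      simp only [← hrun, ← hrest']
      have harith : ans + (2 - aRun) + 2 * ((run.length : Int) - 1) =
          ans + 2 * (run.length : Int) - aRun := by ring
      rw [harith]
      have hrec := loop_eq rest' (ans + 2 * (run.length : Int) - aRun) 0 (by omega) (by omega)
        (fun h => absurd rfl h)
      norm_num at hrec
      exact hrec
termination_by xs.length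
decreasing_by
  all_goals
    simp only [List.dropWhile_cons, beq_self_eq_true, if_true]
    exact Nat.lt_succ_of_le (List.length_dropWhile_le _ _)

-- ===== VERDICT (by name: the statement is the Claim_ definition above) =====
theorem solution_spec : Claim_equal_solution := by
  intro S _ _
  unfold Spec_solution solution solution_alt
  have h := loop_eq S.toList 0 0 (by omega) (by omega) (fun h => absurd rfl h)
  norm_num at h
  cases hA : solA_loop S.toList 0 2 with
  | inl r =>
    rw [hA] at h; simp [pvToRes] at h
    rw [← h]
  | inr p =>
    obtain ⟨a, f⟩ := p
    rw [hA] at h; simp [pvToRes] at h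
    rw [← h]
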